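-- pv_equiv track=rewrite | github.com/ZenglaiMa/machine-learning-in-action | 3_naive-bayes/3_the-relationship-between-deleteN-and-accuracy/main.py | extract_feature_words
-- ===== SOURCE A (Python) =====
-- def extract_feature_words(all_words_list, delete_n, stopwords_set):
--     """抽取特征词, 即从出现的所有词中抽取我们认为有用的词, 又即构建有用的词的词表
--     Args:
--         all_words_list (list): 所有出现的单词组成的列表, 已按词频从高到低排序好
--         delete_n (int): 删除词频高的前 delete_n个词
--         stopwords_set (set): 停用词集合
--     Returns:
--         feature_words_dict (dict): 特征词字典, 键为特征词, 值为其索引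
--     """
--     feature_words_dict = {}
--     n = 1
--     for i in range(delete_n, len(all_words_list)):
--         if n > 2000:  # 抽取2000个特征词, 即我们将每个文档的维度设置为 2000
--             break
--         word = all_words_list[i]
--         if (not word.isdigit()) and (word not in stopwords_set) and (1 < len(word) < 5):  # 不是数字、不是停用词、长度大于1小于5, 才可被当做特征词
--             if word not in feature_words_dict:
--                 feature_words_dict[word] = len(feature_words_dict)
--                 n += 1
--     return feature_words_dict
-- ===== SOURCE B (Python) =====
-- def extract_feature_words(all_words_list, delete_n, stopwords_set):
--     """Different mechanism: scan the suffix BACKWARDS recording each candidate word's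
--     position (the last write, at the smallest position, wins, so the dict maps every
--     candidate to its FIRST occurrence), then recover the original first-occurrence
--     order by sorting the keys on that position and index the first 2000."""
--     words = all_words_list[delete_n:]
--     first_pos = {}
--     for pos, w in reversed(list(enumerate(words))):
--         if not w.isdigit() and w not in stopwords_set and 1 < len(w) < 5:
--             first_pos[w] = pos
--     ordered = sorted(first_pos, key=first_pos.get)
--     return {w: i for i, w in enumerate(ordered[:2000])}
-- ===== Notes on version B (the rewrite author's own statement) =====
-- stated objective: alternative
-- what changed: A dedupes with an in-order forward scan, a membership test against the growing result dict, a manual counter and an early break; B instead scans the suffix backwards overwriting a word->position map (so each candidate ends mapped to its first-occurrence position), then sorts the keys by that position to recover the order and indexes the first 2000.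
-- outside the precondition, e.g. on extract_feature_words(['ab', 'cd'], -1, set()): A returns {'cd': 0, 'ab': 1}, B returns {'cd': 0}
import Mathlib
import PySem

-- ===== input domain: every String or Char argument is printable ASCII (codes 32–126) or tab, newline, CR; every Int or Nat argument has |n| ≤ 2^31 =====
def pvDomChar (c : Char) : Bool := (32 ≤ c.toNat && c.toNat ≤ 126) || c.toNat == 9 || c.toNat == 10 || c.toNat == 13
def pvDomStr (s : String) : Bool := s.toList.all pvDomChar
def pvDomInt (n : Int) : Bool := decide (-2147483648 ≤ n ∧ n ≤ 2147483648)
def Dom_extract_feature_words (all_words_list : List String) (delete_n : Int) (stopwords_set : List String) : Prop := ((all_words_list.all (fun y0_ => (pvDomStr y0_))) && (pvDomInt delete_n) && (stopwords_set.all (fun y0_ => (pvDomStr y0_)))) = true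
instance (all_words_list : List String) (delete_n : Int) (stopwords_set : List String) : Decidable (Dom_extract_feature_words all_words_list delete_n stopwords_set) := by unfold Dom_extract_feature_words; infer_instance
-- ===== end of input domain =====

-- B replaces A's fused forward dedup loop (counter, early break, in-dict test) by a backward
-- scan that overwrites a word→first-position map, then sorts the keys by position (alternative).

-- ===== PORT A =====
-- the candidate test of A's inner if, shared verbatim by both ports (same expression in both Pythons)
def efwPred (stopwords_set : List String) (word : String) : Bool :=
  !(PySem.Str.strIsdigit word) && !(stopwords_set.contains word) &&
    (1 < PySem.Str.len word && PySem.Str.len word < 5)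

-- the 'for i in range(delete_n, len(all_words_list))' loop of A, with its break and counter n.
-- xs[i] is ported as pyGetD with default "": Pre_ keeps every generated index in range.
def efwLoop (all_words_list stopwords_set : List String) :
    List Int → PySem.Dict String Int → Int → PySem.Dict String Int
  | [], d, _ => d
  | i :: rest, d, n =>
    if 2000 < n then d
    else
      let word := PySem.List.pyGetD all_words_list i ""
      if efwPred stopwords_set word then
        if !(d.contains word) then
          efwLoop all_words_list stopwords_set rest (d.insert word ((d.size : Int))) (n + 1)
        else efwLoop all_words_list stopwords_set rest d n
      else efwLoop all_words_list stopwords_set rest d n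

def extract_feature_words (all_words_list : List String) (delete_n : Int) (stopwords_set : List String) : List (String × Int) :=
  (efwLoop all_words_list stopwords_set
      (PySem.List.pyRange delete_n (all_words_list.length : Int) 1)
      PySem.Dict.empty 1).items

-- ===== PORT B =====
-- the 'for pos, w in reversed(list(enumerate(words)))' loop of B, overwriting first_pos[w] = pos
def efwScan (stopwords_set : List String) :
    List (Int × String) → PySem.Dict String Int → PySem.Dict String Int
  | [], d => d
  | (pos, w) :: rest, d =>
    if efwPred stopwords_set w then efwScan stopwords_set rest (d.insert w pos)
    else efwScan stopwords_set rest d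

def extract_feature_words_alt (all_words_list : List String) (delete_n : Int) (stopwords_set : List String) : List (String × Int) :=
  let words := PySem.List.slice all_words_list (some delete_n) none
  let first_pos := efwScan stopwords_set (PySem.List.enumerate words 0).reverse PySem.Dict.empty
  -- sorted(first_pos, key=first_pos.get): every key is in the dict, so .get = .getD _ 0 here
  let ordered := PySem.List.sorted first_pos.keys (fun w => first_pos.getD w 0) false
  (PySem.List.enumerate (ordered.take 2000) 0).map (fun p => (p.2, p.1))

-- ===== PRECONDITION & SPEC =====
-- Pre_ restricts delete_n to the function's natural 'delete the top-n frequent words' domain 0 ≤ delete_n: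
-- for delete_n < -len A raises IndexError, and for -len ≤ delete_n < 0 A's negative-index wraparound
-- scans the suffix and then the whole list again — an accidental behaviour on an input outside that domain,
-- where B's slice reading is equally defensible.
def Pre_extract_feature_words (all_words_list : List String) (delete_n : Int) (stopwords_set : List String) : Prop :=
  0 ≤ delete_n
instance (all_words_list : List String) (delete_n : Int) (stopwords_set : List String) : Decidable (Pre_extract_feature_words all_words_list delete_n stopwords_set) := by unfold Pre_extract_feature_words; infer_instance

def pvWitness_extract_feature_words : List String × Int × List String :=
  (["the", "cat", "cats", "12", "cat", "x", "word"], 1, ["cats"])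

def Spec_extract_feature_words (all_words_list : List String) (delete_n : Int) (stopwords_set : List String) (out : List (String × Int)) : Prop := out = extract_feature_words_alt all_words_list delete_n stopwords_set
instance (all_words_list : List String) (delete_n : Int) (stopwords_set : List String) (out : List (String × Int)) : Decidable (Spec_extract_feature_words all_words_list delete_n stopwords_set out) := by unfold Spec_extract_feature_words; infer_instance

-- ===== CLAIM (what is proved, stated in full; the proofs are below) =====
def Claim_equal_extract_feature_words : Prop := ∀ (all_words_list : List String) (delete_n : Int) (stopwords_set : List String), Dom_extract_feature_words all_words_list delete_n stopwords_set → Pre_extract_feature_words all_words_list delete_n stopwords_set → Spec_extract_feature_words all_words_list delete_n stopwords_set (extract_feature_words all_words_list delete_n stopwords_set)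

-- ===== LEMMAS AND PROOFS =====

-- A's loop over words instead of indices (proof vehicle)
def efwLoopW (stopwords_set : List String) :
    List String → PySem.Dict String Int → Int → PySem.Dict String Int
  | [], d, _ => d
  | w :: rest, d, n =>
    if 2000 < n then d
    else
      if efwPred stopwords_set w then
        if !(d.contains w) then
          efwLoopW stopwords_set rest (d.insert w ((d.size : Int))) (n + 1)
        else efwLoopW stopwords_set rest d n
      else efwLoopW stopwords_set rest d n

-- (w, k) :: (w', k+1) :: … — the enumerate-and-swap tail of B's pipeline
def eswap (k : Int) : List String → List (String × Int)
  | [] => []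
  | w :: ws => (w, k) :: eswap (k + 1) ws

lemma efwLoop_eq_loopW (l sw : List String) (is : List Int) (d : PySem.Dict String Int) (n : Int) :
    efwLoop l sw is d n = efwLoopW sw (is.map (fun i => PySem.List.pyGetD l i "")) d n := by
  induction is generalizing d n with
  | nil => rfl
  | cons i rest ih =>
    simp only [efwLoop, efwLoopW, List.map_cons]
    split_ifs <;> simp [ih]

lemma map_enumerate_eq_eswap (xs : List String) (s : Int) :
    (PySem.List.enumerate xs s).map (fun p => (p.2, p.1)) = eswap s xs := by
  induction xs generalizing s with
  | nil => rfl
  | cons w ws ih => rw [PySem.List.enumerate_cons]; simp [eswap, ih]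

lemma discard_eq_filter (X : List String) (w : String) :
    PySem.Set.discard X w = X.filter (fun y => !(y == w)) := by
  simp [PySem.Set.discard]

lemma filter_discard_of_false (X : List String) (w : String) (q : String → Bool) (hq : q w = false) :
    (PySem.Set.discard X w).filter q = X.filter q := by
  rw [discard_eq_filter, List.filter_filter]
  apply List.filter_congr
  intro y _
  by_cases h : y = w
  · subst h; simp [hq]
  · simp [h]

lemma filter_discard_seen (X seen : List String) (w : String) :
    (PySem.Set.discard X w).filter (fun y => !(seen.contains y)) =
      X.filter (fun y => !((seen ++ [w]).contains y)) := by
  rw [discard_eq_filter, List.filter_filter]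
  apply List.filter_congr
  intro y _
  by_cases h : y = w <;> simp [h]

-- the "new distinct candidates after seen" stream
def fresh (sw : List String) (ws seen : List String) : List String :=
  (PySem.List.dedup (ws.filter (fun w => efwPred sw w))).filter (fun w => !(seen.contains w))

lemma fresh_cons_skip (sw : List String) (w : String) (ws seen : List String)
    (h : efwPred sw w = false) : fresh sw (w :: ws) seen = fresh sw ws seen := by
  simp [fresh, h]

lemma fresh_cons_seen (sw : List String) (w : String) (ws seen : List String)
    (hp : efwPred sw w = true) (hs : w ∈ seen) :
    fresh sw (w :: ws) seen = fresh sw ws seen := by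
  have hc : (seen.contains w) = true := by simpa using hs
  unfold fresh
  rw [List.filter_cons_of_pos hp, PySem.List.dedup_eq_ofList, PySem.List.dedup_eq_ofList,
      PySem.Set.ofList_cons, List.filter_cons_of_neg (by simpa using hs),
      filter_discard_of_false _ _ _ (by simpa using hs)]

lemma fresh_cons_new (sw : List String) (w : String) (ws seen : List String)
    (hp : efwPred sw w = true) (hs : w ∉ seen) :
    fresh sw (w :: ws) seen = w :: fresh sw ws (seen ++ [w]) := by
  have hc : (seen.contains w) = false := by simpa using hs
  unfold fresh
  rw [List.filter_cons_of_pos hp, PySem.List.dedup_eq_ofList, PySem.List.dedup_eq_ofList,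
      PySem.Set.ofList_cons, List.filter_cons_of_pos (by simpa using hs),
      filter_discard_seen]

lemma main_loop (sw : List String) (ws : List String) (d : PySem.Dict String Int) (n : Int)
    (hn : n = (d.items.length : Int) + 1) (hnd : d.keys.Nodup) :
    (efwLoopW sw ws d n).items =
      d.items ++ eswap (d.items.length : Int) ((fresh sw ws d.keys).take (2000 - d.items.length)) := by
  induction ws generalizing d n with
  | nil => simp [efwLoopW, fresh, eswap]
  | cons w ws ih =>
    by_cases hbig : 2000 < n
    · have hlen : 2000 - d.items.length = 0 := by omega
      simp [efwLoopW, hbig, hlen, eswap]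
    · have hlt : d.items.length < 2000 := by omega
      simp only [efwLoopW, if_neg hbig]
      by_cases hp : efwPred sw w = true
      · by_cases hmem : w ∈ d.keys
        · have hc : d.contains w = true := by
            rw [PySem.Dict.contains_eq_decide_mem_keys]; simpa using hmem
          rw [if_pos hp, hc]
          simp only [Bool.not_true, Bool.false_eq_true, if_false]
          rw [ih d n hn hnd, fresh_cons_seen sw w ws d.keys hp hmem]
        · have hc : d.contains w = false := by
            rw [PySem.Dict.contains_eq_decide_mem_keys]; simpa using hmem
          rw [if_pos hp, hc]
          simp only [Bool.not_false, if_true]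
          have hitems : (d.insert w ((d.size : Int))).items = d.items ++ [(w, (d.size : Int))] := by
            rw [PySem.Dict.items_insert, hc]; simp
          have hkeys : (d.insert w ((d.size : Int))).keys = d.keys ++ [w] := by
            simp only [PySem.Dict.keys, hitems, List.map_append, List.map_cons, List.map_nil]
          have hnd' : (d.insert w ((d.size : Int))).keys.Nodup := by
            rw [hkeys, List.nodup_append]
            exact ⟨hnd, List.nodup_singleton w, by
              intro a ha b hb
              simp only [List.mem_singleton] at hb
              exact fun h => hmem ((hb ▸ h) ▸ ha)⟩
          have hlen' : (d.insert w ((d.size : Int))).items.length = d.items.length + 1 := by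
            simp [hitems]
          rw [ih _ (n + 1) (by rw [hlen']; omega) hnd']
          rw [fresh_cons_new sw w ws d.keys hp hmem]
          have htake : (2000 - d.items.length) = (2000 - (d.items.length + 1)) + 1 := by omega
          rw [htake, List.take_succ_cons]
          simp only [eswap, hitems, hkeys]
          have hsize : ((d.size : Int)) = (d.items.length : Int) := by
            simp [PySem.Dict.size]
          simp [hsize, List.append_assoc]
      · simp only [Bool.not_eq_true] at hp
        rw [hp]
        simp only [Bool.false_eq_true, if_false]
        rw [ih d n hn hnd, fresh_cons_skip sw w ws d.keys hp]

-- ===== B-side lemmas: the backward scan builds the first-occurrence map =====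

-- the scan over the REVERSED enumeration, seen forwards (foldr view of efwScan)
def efwFold (sw : List String) : List (Int × String) → PySem.Dict String Int
  | [] => PySem.Dict.empty
  | (pos, w) :: rest =>
    if efwPred sw w then (efwFold sw rest).insert w pos else efwFold sw rest

lemma efwScan_append (sw : List String) (xs ys : List (Int × String)) (d : PySem.Dict String Int) :
    efwScan sw (xs ++ ys) d = efwScan sw ys (efwScan sw xs d) := by
  induction xs generalizing d with
  | nil => rfl
  | cons p rest ih => obtain ⟨pos, w⟩ := p; simp only [List.cons_append, efwScan]; split_ifs <;> exact ih _

lemma efwScan_reverse (sw : List String) (ps : List (Int × String)) :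
    efwScan sw ps.reverse PySem.Dict.empty = efwFold sw ps := by
  induction ps with
  | nil => rfl
  | cons p rest ih =>
    obtain ⟨pos, w⟩ := p
    rw [List.reverse_cons, efwScan_append, ih]
    simp only [efwScan, efwFold]

-- first index (offset s) of w in ws
def fIdx (w : String) : Int → List String → Int
  | s, [] => s
  | s, v :: vs => if v = w then s else fIdx w (s + 1) vs

lemma fIdx_ge (w : String) (s : Int) (ws : List String) : s ≤ fIdx w s ws := by
  induction ws generalizing s with
  | nil => simp [fIdx]
  | cons v vs ih =>
    simp only [fIdx]
    split_ifs
    · omega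
    · have := ih (s + 1); omega

lemma efwFold_keys_nodup (sw : List String) (ps : List (Int × String)) :
    (efwFold sw ps).keys.Nodup := by
  induction ps with
  | nil => simp [efwFold]
  | cons p rest ih =>
    obtain ⟨pos, w⟩ := p
    simp only [efwFold]
    split_ifs
    · exact PySem.Dict.nodup_keys_insert _ _ _ ih
    · exact ih

lemma efwFold_mem_keys (sw : List String) (ws : List String) (s : Int) (x : String) :
    x ∈ (efwFold sw (PySem.List.enumerate ws s)).keys ↔ (x ∈ ws ∧ efwPred sw x = true) := by
  induction ws generalizing s with
  | nil => simp [PySem.List.enumerate, efwFold, PySem.Dict.keys_empty]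
  | cons v vs ih =>
    rw [PySem.List.enumerate_cons]
    simp only [efwFold]
    split_ifs with hp
    · rw [PySem.Dict.mem_keys_insert, ih]
      constructor
      · rintro (rfl | ⟨hm, hq⟩)
        · exact ⟨List.mem_cons_self .., hp⟩
        · exact ⟨List.mem_cons_of_mem _ hm, hq⟩
      · rintro ⟨hm, hq⟩
        rcases List.mem_cons.mp hm with rfl | hm
        · exact Or.inl rfl
        · exact Or.inr ⟨hm, hq⟩
    · rw [ih]
      constructor
      · rintro ⟨hm, hq⟩; exact ⟨List.mem_cons_of_mem _ hm, hq⟩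
      · rintro ⟨hm, hq⟩
        rcases List.mem_cons.mp hm with rfl | hm
        · exact absurd hq (by simp [hp])
        · exact ⟨hm, hq⟩

lemma efwFold_getD (sw : List String) (ws : List String) (s : Int) (w : String)
    (hp : efwPred sw w = true) (hm : w ∈ ws) :
    (efwFold sw (PySem.List.enumerate ws s)).getD w 0 = fIdx w s ws := by
  induction ws generalizing s with
  | nil => cases hm
  | cons v vs ih =>
    rw [PySem.List.enumerate_cons]
    simp only [efwFold, fIdx]
    by_cases hvw : v = w
    · subst hvw
      rw [if_pos hp, if_pos rfl, PySem.Dict.getD_insert_self]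
    · rw [if_neg hvw]
      have hm' : w ∈ vs := by rcases List.mem_cons.mp hm with rfl | h; exact absurd rfl hvw; exact h
      split_ifs with hq
      · rw [PySem.Dict.getD_insert_of_ne _ _ _ (fun h : w = v => hvw h.symm), ih _ hm']
      · exact ih _ hm'

-- along dedup(filter pred ws) the first indices strictly increase
lemma dedup_filter_pairwise_fIdx (sw : List String) (ws : List String) (s : Int) :
    (PySem.List.dedup (ws.filter (fun w => efwPred sw w))).Pairwise
      (fun a b => fIdx a s ws < fIdx b s ws) := by
  induction ws generalizing s with
  | nil => simp [PySem.List.dedup_eq_ofList, PySem.Set.ofList]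
  | cons v vs ih =>
    have hstep : ∀ x : String, x ≠ v → fIdx x s (v :: vs) = fIdx x (s + 1) vs := by
      intro x hx
      simp only [fIdx]
      rw [if_neg (fun h : v = x => hx h.symm)]
    by_cases hp : efwPred sw v = true
    · rw [List.filter_cons_of_pos hp, PySem.List.dedup_eq_ofList, PySem.Set.ofList_cons,
          discard_eq_filter, ← PySem.List.dedup_eq_ofList]
      refine List.pairwise_cons.mpr ⟨?_, ?_⟩
      · intro b hb
        have hbv : b ≠ v := by simpa using (List.of_mem_filter hb)
        have h1 : fIdx v s (v :: vs) = s := by simp [fIdx]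
        rw [h1, hstep b hbv]
        have := fIdx_ge b (s + 1) vs; omega
      · refine List.Pairwise.imp_of_mem ?_
          (List.Pairwise.sublist List.filter_sublist (ih (s + 1)))
        intro a b ha hb hlt
        have hav : a ≠ v := by simpa using (List.of_mem_filter ha)
        have hbv : b ≠ v := by simpa using (List.of_mem_filter hb)
        rw [hstep a hav, hstep b hbv]; exact hlt
    · have hp' : efwPred sw v = false := by simpa using hp
      rw [List.filter_cons_of_neg (by simp [hp'])]
      refine (ih (s + 1)).imp_of_mem ?_
      intro a b ha hb hlt
      have hap : efwPred sw a = true := (List.mem_filter.mp ((PySem.List.mem_dedup _ _).mp ha)).2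
      have hbp : efwPred sw b = true := (List.mem_filter.mp ((PySem.List.mem_dedup _ _).mp hb)).2
      have hav : a ≠ v := fun h => by rw [h] at hap; rw [hap] at hp'; cases hp'
      have hbv : b ≠ v := fun h => by rw [h] at hbp; rw [hbp] at hp'; cases hp'
      rw [hstep a hav, hstep b hbv]; exact hlt

-- the sort step of B names exactly the ordered dedup stream
lemma sorted_keys_eq_dedup (sw : List String) (ws : List String) :
    (PySem.List.sorted (efwFold sw (PySem.List.enumerate ws 0)).keys
        (fun w => (efwFold sw (PySem.List.enumerate ws 0)).getD w 0) false) =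
      PySem.List.dedup (ws.filter (fun w => efwPred sw w)) := by
  refine PySem.List.sorted_eq_of_perm_of_pairwise_lt _ _ _ ?_ ?_
  · rw [List.perm_ext_iff_of_nodup
        (by rw [PySem.List.dedup_eq_ofList]; exact PySem.Set.nodup_ofList _)
        (efwFold_keys_nodup sw _)]
    intro x
    rw [PySem.List.mem_dedup, List.mem_filter, efwFold_mem_keys]
  · refine (dedup_filter_pairwise_fIdx sw ws 0).imp_of_mem ?_
    intro a b ha hb hlt
    have ha' := List.mem_filter.mp ((PySem.List.mem_dedup _ _).mp ha)
    have hb' := List.mem_filter.mp ((PySem.List.mem_dedup _ _).mp hb)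
    rw [efwFold_getD sw ws 0 a ha'.2 ha'.1, efwFold_getD sw ws 0 b hb'.2 hb'.1]
    exact hlt

-- ===== VERDICT (by name: the statement is the Claim_ definition above) =====
theorem extract_feature_words_spec : Claim_equal_extract_feature_words := by
  intro l dn sw _hdom hpre
  unfold Spec_extract_feature_words extract_feature_words extract_feature_words_alt
  have hpre' : (0 : Int) ≤ dn := hpre
  rw [efwLoop_eq_loopW, PySem.List.map_pyGetD_pyRange' l "" hpre']
  rw [main_loop sw (l.drop dn.toNat) PySem.Dict.empty 1 (by rfl) (by decide)]
  simp only [PySem.List.slice_from l hpre']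
  rw [efwScan_reverse, sorted_keys_eq_dedup, map_enumerate_eq_eswap]
  simp [fresh, PySem.Dict.empty, PySem.Dict.keys]
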